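-- pv_equiv track=rewrite | github.com/hungkimanh/Project_ | compare_multivisit_solutions_csv.py | infer_trip_trucks
-- ===== SOURCE A (Python) =====
-- from typing import Any, Dict, List, Optional, Tuple
--
-- def infer_trip_trucks(trucks_raw: Any, trip_events: Any) -> Tuple[List[int], List[int]]:
--     """
--     Infer truck_id per event by matching rendezvous city and subset of packages
--     against the truck routes (same logic style as recompute_metrics_from_solutions_csv.py).
--     Returns:
--       event_trucks: list of inferred truck_id (or -1)
--       event_stop_idx: list of inferred stop index (or -1)
--     """
--     truck_routes: List[List[Tuple[int, List[int]]]] = []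
--     for tr in trucks_raw:
--         route: List[Tuple[int, List[int]]] = []
--         for stop in tr:
--             city = int(stop[0])
--             pkgs = [int(x) for x in stop[1]]
--             route.append((city, pkgs))
--         truck_routes.append(route)
--
--     stop_candidates: Dict[int, List[Tuple[int, int, List[int]]]] = {}
--     for tid, route in enumerate(truck_routes):
--         for idx, (city, pkgs) in enumerate(route):
--             if city == 0:
--                 continue
--             stop_candidates.setdefault(city, []).append((tid, idx, pkgs))
--
--     event_trucks: List[int] = []
--     event_stop_idx: List[int] = []
--     for ev in trip_events:
--         city = int(ev[0])
--         pkgs = [int(x) for x in ev[1]]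
--         cands = stop_candidates.get(city, [])
--         sp = set(pkgs)
--         chosen = None
--         for tid, idx, spkgs in cands:
--             if sp.issubset(set(spkgs)):
--                 chosen = (tid, idx)
--                 break
--         if chosen is None and cands:
--             chosen = (cands[0][0], cands[0][1])
--         if chosen is None:
--             event_trucks.append(-1)
--             event_stop_idx.append(-1)
--         else:
--             event_trucks.append(int(chosen[0]))
--             event_stop_idx.append(int(chosen[1]))
--     return event_trucks, event_stop_idx
-- ===== SOURCE B (Python) =====
-- from typing import Any, List, Tuple
--
-- def infer_trip_trucks(trucks_raw: Any, trip_events: Any) -> Tuple[List[int], List[int]]: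
--     # Same upfront parse as the original (so malformed trucks fail at the same point),
--     # but no city-indexed candidate dict: each event scans the routes directly,
--     # remembering the first city-match as fallback and stopping at the first
--     # city-match whose package set covers the event's packages.
--     truck_routes: List[List[Tuple[int, List[int]]]] = []
--     for tr in trucks_raw:
--         route: List[Tuple[int, List[int]]] = []
--         for stop in tr:
--             route.append((int(stop[0]), [int(x) for x in stop[1]]))
--         truck_routes.append(route)
--
--     event_trucks: List[int] = []
--     event_stop_idx: List[int] = []
--     for ev in trip_events:
--         city = int(ev[0])
--         sp = set(int(x) for x in ev[1])
--         first = None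
--         chosen = None
--         for tid, route in enumerate(truck_routes):
--             for idx, (scity, spkgs) in enumerate(route):
--                 if scity == 0 or scity != city:
--                     continue
--                 if first is None:
--                     first = (tid, idx)
--                 if sp.issubset(spkgs):
--                     chosen = (tid, idx)
--                     break
--             if chosen is not None:
--                 break
--         if chosen is None:
--             chosen = first
--         if chosen is None:
--             event_trucks.append(-1)
--             event_stop_idx.append(-1)
--         else:
--             event_trucks.append(chosen[0])
--             event_stop_idx.append(chosen[1])
--     return event_trucks, event_stop_idx
-- ===== Notes on version B (the rewrite author's own statement) =====
-- stated objective: alternative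
-- what changed: Drops the city-keyed candidate dict (setdefault/append grouping) entirely: each event scans the parsed routes directly in (tid, idx) order with an early break, tracking the first city-match as the fallback.
import Mathlib
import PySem

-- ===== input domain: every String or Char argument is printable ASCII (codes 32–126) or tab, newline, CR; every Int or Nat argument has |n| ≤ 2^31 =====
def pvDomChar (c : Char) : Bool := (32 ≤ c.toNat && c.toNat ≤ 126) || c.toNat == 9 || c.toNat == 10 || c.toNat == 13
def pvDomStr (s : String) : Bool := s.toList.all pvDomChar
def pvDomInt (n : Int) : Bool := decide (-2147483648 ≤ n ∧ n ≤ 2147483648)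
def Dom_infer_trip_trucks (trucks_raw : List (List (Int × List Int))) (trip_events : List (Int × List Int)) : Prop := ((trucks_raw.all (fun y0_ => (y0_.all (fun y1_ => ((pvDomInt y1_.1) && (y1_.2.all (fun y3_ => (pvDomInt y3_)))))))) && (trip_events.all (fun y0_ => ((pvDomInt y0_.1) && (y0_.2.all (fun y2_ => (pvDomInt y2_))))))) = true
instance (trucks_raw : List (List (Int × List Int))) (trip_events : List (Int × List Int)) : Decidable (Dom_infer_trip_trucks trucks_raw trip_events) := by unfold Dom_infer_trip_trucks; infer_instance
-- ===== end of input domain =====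

-- B replaces A's city-keyed candidate dict with a direct per-event scan of the routes
-- (first city-match remembered as fallback, break at the first covering match); same values, no speed claim.

-- ===== PORT A =====
-- for tid, idx, spkgs in cands: if sp.issubset(set(spkgs)): chosen = (tid, idx); break
-- (x ∈ set(spkgs) iff x ∈ spkgs, so the issubset test is `sp.all (· ∈ spkgs)` with sp the distinct packages)
def aFindChosen (sp : List Int) : List (Int × Int × List Int) → Option (Int × Int)
  | [] => none
  | (tid, idx, spkgs) :: rest =>
    if sp.all (fun x => decide (x ∈ spkgs)) then some (tid, idx) else aFindChosen sp rest

def infer_trip_trucks (trucks_raw : List (List (Int × List Int))) (trip_events : List (Int × List Int)) : List Int × List Int :=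
  -- parse loop (int() on an int is the identity)
  let truck_routes : List (List (Int × List Int)) :=
    trucks_raw.foldl (fun acc tr =>
      acc ++ [tr.foldl (fun route stop => route ++ [(stop.1, stop.2.map (fun x => x))]) []]) []
  -- stop_candidates: for tid, route in enumerate(...): for idx, (city, pkgs) in enumerate(route):
  --   if city == 0: continue; stop_candidates.setdefault(city, []).append((tid, idx, pkgs))
  let stop_candidates : PySem.Dict Int (List (Int × Int × List Int)) :=
    (PySem.List.enumerate truck_routes 0).foldl (fun d p =>
      (PySem.List.enumerate p.2 0).foldl (fun d q =>
        if q.2.1 = 0 then d else d.modify q.2.1 [] (· ++ [(p.1, q.1, q.2.2)])) d)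
      PySem.Dict.empty
  trip_events.foldl (fun (acc : List Int × List Int) ev =>
    let city := ev.1
    let pkgs := ev.2.map (fun x => x)
    let cands := stop_candidates.getD city []
    let sp := PySem.Set.ofList pkgs
    let chosen := aFindChosen sp cands
    let chosen := match chosen with
      | some r => some r
      | none => match cands with
        | [] => none
        | c :: _ => some (c.1, c.2.1)
    match chosen with
    | none => (acc.1 ++ [-1], acc.2 ++ [-1])
    | some r => (acc.1 ++ [r.1], acc.2 ++ [r.2])) ([], [])

-- ===== PORT B =====
-- inner loop over one route: skip city==0 and wrong-city stops, remember the first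
-- city-match in `first`, break with the first covering match; returns (chosen, first)
def bScanStops (c : Int) (sp : List Int) (tid : Int) :
    List (Int × (Int × List Int)) → Option (Int × Int) → Option (Int × Int) × Option (Int × Int)
  | [], first => (none, first)
  | q :: rest, first =>
    if q.2.1 = 0 ∨ q.2.1 ≠ c then bScanStops c sp tid rest first
    else
      let first' := match first with | none => some (tid, q.1) | some f => some f
      if sp.all (fun x => decide (x ∈ q.2.2)) then (some (tid, q.1), first')
      else bScanStops c sp tid rest first'

-- outer loop over enumerate(truck_routes): break as soon as a route yields a match
def bScanRoutes (c : Int) (sp : List Int) :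
    List (Int × List (Int × List Int)) → Option (Int × Int) → Option (Int × Int) × Option (Int × Int)
  | [], first => (none, first)
  | p :: rest, first =>
    match bScanStops c sp p.1 (PySem.List.enumerate p.2 0) first with
    | (some r, first') => (some r, first')
    | (none, first') => bScanRoutes c sp rest first'

def infer_trip_trucks_alt (trucks_raw : List (List (Int × List Int))) (trip_events : List (Int × List Int)) : List Int × List Int :=
  -- same upfront parse as A
  let truck_routes : List (List (Int × List Int)) :=
    trucks_raw.foldl (fun acc tr =>
      acc ++ [tr.foldl (fun route stop => route ++ [(stop.1, stop.2.map (fun x => x))]) []]) []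
  trip_events.foldl (fun (acc : List Int × List Int) ev =>
    let sp := PySem.Set.ofList (ev.2.map (fun x => x))
    match bScanRoutes ev.1 sp (PySem.List.enumerate truck_routes 0) none with
    | (some r, _) => (acc.1 ++ [r.1], acc.2 ++ [r.2])
    | (none, some r) => (acc.1 ++ [r.1], acc.2 ++ [r.2])
    | (none, none) => (acc.1 ++ [-1], acc.2 ++ [-1])) ([], [])

-- ===== PRECONDITION & SPEC =====
def Spec_infer_trip_trucks (trucks_raw : List (List (Int × List Int))) (trip_events : List (Int × List Int)) (out : List Int × List Int) : Prop := out = infer_trip_trucks_alt trucks_raw trip_events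
instance (trucks_raw : List (List (Int × List Int))) (trip_events : List (Int × List Int)) (out : List Int × List Int) : Decidable (Spec_infer_trip_trucks trucks_raw trip_events out) := by unfold Spec_infer_trip_trucks; infer_instance

-- ===== CLAIM (what is proved, stated in full; the proofs are below) =====
def Claim_equal_infer_trip_trucks : Prop := ∀ (trucks_raw : List (List (Int × List Int))) (trip_events : List (Int × List Int)), Dom_infer_trip_trucks trucks_raw trip_events → Spec_infer_trip_trucks trucks_raw trip_events (infer_trip_trucks trucks_raw trip_events)

-- ===== LEMMAS AND PROOFS =====

-- the flat (city, (tid, idx, pkgs)) candidate stream in A's insertion order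
def pvFlat (routes : List (List (Int × List Int))) : List (Int × (Int × Int × List Int)) :=
  (PySem.List.enumerate routes 0).flatMap (fun p =>
    ((PySem.List.enumerate p.2 0).filter (fun q => q.2.1 ≠ 0)).map (fun q => (q.2.1, (p.1, q.1, q.2.2))))

def pvCands (routes : List (List (Int × List Int))) (c : Int) : List (Int × Int × List Int) :=
  ((pvFlat routes).filter (fun p => p.1 == c)).map (·.2)

theorem pv_foldl_flatMap {α β δ : Type} (l : List α) (f : α → List β) (g : δ → β → δ) (d : δ) :
    (l.flatMap f).foldl g d = l.foldl (fun d a => (f a).foldl g d) d := by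
  induction l generalizing d with
  | nil => rfl
  | cons x xs ih => simp [List.flatMap_cons, List.foldl_append, ih]

theorem pv_dict_eq (routes : List (List (Int × List Int))) :
    ((PySem.List.enumerate routes 0).foldl (fun d p =>
      (PySem.List.enumerate p.2 0).foldl (fun d q =>
        if q.2.1 = 0 then d else d.modify q.2.1 [] (· ++ [(p.1, q.1, q.2.2)])) d)
      (PySem.Dict.empty : PySem.Dict Int (List (Int × Int × List Int))))
    = (pvFlat routes).foldl (fun d p => d.modify p.1 [] (· ++ [p.2])) PySem.Dict.empty := by
  rw [pvFlat, pv_foldl_flatMap]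
  congr 1
  funext d p
  rw [List.foldl_map, List.foldl_filter]
  congr 1
  funext d q
  by_cases h : q.2.1 = 0 <;> simp [h]

theorem pv_getD_cands (routes : List (List (Int × List Int))) (c : Int) :
    (((pvFlat routes).foldl (fun d p => d.modify p.1 [] (· ++ [p.2]))
      (PySem.Dict.empty : PySem.Dict Int (List (Int × Int × List Int)))).getD c [])
    = pvCands routes c := by
  rw [PySem.Dict.getD_foldl_modify_append, pvCands]
  simp

-- A's per-event choice via find?
def pvChoose (sp : List Int) (l : List (Int × Int × List Int)) : Option (Int × Int) :=
  (l.find? (fun t => sp.all (fun x => decide (x ∈ t.2.2)))).map (fun t => (t.1, t.2.1))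

theorem aFindChosen_eq (sp : List Int) (l : List (Int × Int × List Int)) :
    aFindChosen sp l = pvChoose sp l := by
  induction l with
  | nil => rfl
  | cons t rest ih =>
    obtain ⟨tid, idx, spkgs⟩ := t
    rw [aFindChosen]
    by_cases h : sp.all (fun x => decide (x ∈ spkgs)) = true
    · simp [pvChoose, h]
    · simp [pvChoose, h]
      simpa [pvChoose] using ih

-- A's fallback: head of the candidate list
theorem pv_match_head (cands : List (Int × Int × List Int)) :
    (match cands with
      | [] => (none : Option (Int × Int))
      | c :: _ => some (c.1, c.2.1)) = cands.head?.map (fun t => (t.1, t.2.1)) := by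
  cases cands <;> rfl

-- one route's candidates, as produced by pvCands restricted to that route
def pvRouteCands (c : Int) (tid : Int) (stops : List (Int × (Int × List Int))) : List (Int × Int × List Int) :=
  (stops.filter (fun q => decide ¬(q.2.1 = 0 ∨ q.2.1 ≠ c))).map (fun q => (tid, q.1, q.2.2))

theorem bScanStops_cons (c : Int) (sp : List Int) (tid : Int) (q : Int × (Int × List Int))
    (rest : List (Int × (Int × List Int))) (first : Option (Int × Int)) :
    bScanStops c sp tid (q :: rest) first =
      if q.2.1 = 0 ∨ q.2.1 ≠ c then bScanStops c sp tid rest first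
      else
        let first' := match first with | none => some (tid, q.1) | some f => some f
        if sp.all (fun x => decide (x ∈ q.2.2)) then (some (tid, q.1), first')
        else bScanStops c sp tid rest first' := rfl

theorem bScanStops_eq (c : Int) (sp : List Int) (tid : Int) (stops : List (Int × (Int × List Int))) (first : Option (Int × Int)) :
    bScanStops c sp tid stops first =
      (pvChoose sp (pvRouteCands c tid stops),
       first.or ((pvRouteCands c tid stops).head?.map (fun t => (t.1, t.2.1)))) := by
  induction stops generalizing first with
  | nil => simp [bScanStops, pvRouteCands, pvChoose]
  | cons q rest ih =>
    rw [bScanStops_cons]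
    by_cases hk : q.2.1 = 0 ∨ q.2.1 ≠ c
    · simp only [if_pos hk, ih, pvRouteCands, List.filter_cons]
      simp [hk]
    · obtain ⟨h0, hc⟩ := not_or.mp hk
      rw [not_not] at hc
      have hc0 : c ≠ 0 := by omega
      have hfilter : pvRouteCands c tid (q :: rest) = (tid, q.1, q.2.2) :: pvRouteCands c tid rest := by
        simp [pvRouteCands, hc, hc0]
      rw [if_neg hk, hfilter]
      by_cases hm : sp.all (fun x => decide (x ∈ q.2.2)) = true
      · cases first <;> simp [hm, pvChoose, Option.or]
      · rw [if_neg (by simpa using hm)]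
        simp only [ih]
        cases first <;> simp [pvChoose, hm, Option.or]

-- all routes' candidates, in scan order
def pvAllCands (c : Int) (routesEnum : List (Int × List (Int × List Int))) : List (Int × Int × List Int) :=
  routesEnum.flatMap (fun p => pvRouteCands c p.1 (PySem.List.enumerate p.2 0))

theorem pvChoose_append (sp : List Int) (l₁ l₂ : List (Int × Int × List Int)) :
    pvChoose sp (l₁ ++ l₂) = (pvChoose sp l₁).or (pvChoose sp l₂) := by
  simp [pvChoose, List.find?_append]
  cases List.find? (fun t => sp.all (fun x => decide (x ∈ t.2.2))) l₁ <;> simp [Option.or]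

theorem bScanRoutes_cons (c : Int) (sp : List Int) (p : Int × List (Int × List Int))
    (rest : List (Int × List (Int × List Int))) (first : Option (Int × Int)) :
    bScanRoutes c sp (p :: rest) first =
      match bScanStops c sp p.1 (PySem.List.enumerate p.2 0) first with
      | (some r, first') => (some r, first')
      | (none, first') => bScanRoutes c sp rest first' := rfl

theorem bScanRoutes_eq (c : Int) (sp : List Int) (routesEnum : List (Int × List (Int × List Int))) (first : Option (Int × Int)) :
    bScanRoutes c sp routesEnum first =
      (pvChoose sp (pvAllCands c routesEnum),
       first.or ((pvAllCands c routesEnum).head?.map (fun t => (t.1, t.2.1)))) := by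
  induction routesEnum generalizing first with
  | nil => simp [bScanRoutes, pvAllCands, pvChoose]
  | cons p rest ih =>
    rw [bScanRoutes_cons, bScanStops_eq]
    have hall : pvAllCands c (p :: rest) = pvRouteCands c p.1 (PySem.List.enumerate p.2 0) ++ pvAllCands c rest := by
      simp [pvAllCands]
    rw [hall, pvChoose_append]
    cases hch : pvChoose sp (pvRouteCands c p.1 (PySem.List.enumerate p.2 0)) with
    | some r =>
      have hne : pvRouteCands c p.1 (PySem.List.enumerate p.2 0) ≠ [] := by
        intro h; rw [h] at hch; simp [pvChoose] at hch
      cases hhd : (pvRouteCands c p.1 (PySem.List.enumerate p.2 0)).head? with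
      | none => exact absurd (List.head?_eq_none_iff.mp hhd) hne
      | some t => cases first <;> simp [Option.or, hhd]
    | none =>
      have hred : (match ((none : Option (Int × Int)),
            first.or ((pvRouteCands c p.1 (PySem.List.enumerate p.2 0)).head?.map (fun t => (t.1, t.2.1)))) with
          | (some r, first') => (some r, first')
          | (none, first') => bScanRoutes c sp rest first')
          = bScanRoutes c sp rest (first.or ((pvRouteCands c p.1 (PySem.List.enumerate p.2 0)).head?.map (fun t => (t.1, t.2.1)))) := rfl
      rw [hred, ih]
      cases hhd : (pvRouteCands c p.1 (PySem.List.enumerate p.2 0)).head? with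
      | none =>
        have hnil : pvRouteCands c p.1 (PySem.List.enumerate p.2 0) = [] := List.head?_eq_none_iff.mp hhd
        rw [hnil]
        cases first <;> simp [Option.or]
      | some t =>
        rw [List.head?_append, hhd]
        cases first <;> simp [Option.or]

-- one route of A's keyed stream, restricted to city c, is that route's B-candidates
theorem pv_route_eq (c tid : Int) (l : List (Int × (Int × List Int))) :
    ((((l.filter (fun q => q.2.1 ≠ 0)).map (fun q => (q.2.1, (tid, q.1, q.2.2)))).filter (fun p => p.1 == c)).map (·.2))
      = pvRouteCands c tid l := by
  induction l with
  | nil => rfl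
  | cons q rest ih =>
    by_cases h0 : q.2.1 = 0 <;> by_cases hc : q.2.1 = c
    · have hc0 : c = 0 := by omega
      simpa [pvRouteCands, List.filter_cons, h0, hc, hc0] using ih
    · simpa [pvRouteCands, List.filter_cons, h0, hc] using ih
    · have hc0 : c ≠ 0 := by omega
      simpa [pvRouteCands, List.filter_cons, h0, hc, hc0] using ih
    · simpa [pvRouteCands, List.filter_cons, h0, hc] using ih

-- the two candidate streams coincide
theorem pvAllCands_eq_pvCands (routes : List (List (Int × List Int))) (c : Int) :
    pvAllCands c (PySem.List.enumerate routes 0) = pvCands routes c := by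
  rw [pvCands, pvFlat]
  induction PySem.List.enumerate routes 0 with
  | nil => simp [pvAllCands]
  | cons p rest ih =>
    rw [pvAllCands, List.flatMap_cons, List.flatMap_cons, List.filter_append, List.map_append, ← ih, pvAllCands]
    congr 1
    exact (pv_route_eq c p.1 (PySem.List.enumerate p.2 0)).symm

theorem infer_trip_trucks_eq (trucks_raw : List (List (Int × List Int))) (trip_events : List (Int × List Int)) :
    infer_trip_trucks trucks_raw trip_events = infer_trip_trucks_alt trucks_raw trip_events := by
  rw [infer_trip_trucks, infer_trip_trucks_alt]
  apply PySem.List.foldl_congr_mem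
  intro acc ev _
  simp only [pv_dict_eq, pv_getD_cands, aFindChosen_eq, pv_match_head, bScanRoutes_eq, pvAllCands_eq_pvCands]
  cases hch : pvChoose (PySem.Set.ofList (ev.2.map (fun x => x)))
      (pvCands (trucks_raw.foldl (fun acc tr =>
        acc ++ [tr.foldl (fun route stop => route ++ [(stop.1, stop.2.map (fun x => x))]) []]) []) ev.1) with
  | some r => simp
  | none =>
    simp only [Option.or]
    cases (pvCands (trucks_raw.foldl (fun acc tr =>
        acc ++ [tr.foldl (fun route stop => route ++ [(stop.1, stop.2.map (fun x => x))]) []]) []) ev.1).head? <;> simp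

-- ===== VERDICT (by name: the statement is the Claim_ definition above) =====
theorem infer_trip_trucks_spec : Claim_equal_infer_trip_trucks := by
  intro trucks_raw trip_events _
  unfold Spec_infer_trip_trucks
  exact infer_trip_trucks_eq trucks_raw trip_events
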